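-- pv_equiv track=rewrite | github.com/puneetkakkar/dsa-problems-tracker | templates/py/matrix-bfs.py | BFS
-- ===== SOURCE A (Python) =====
-- from collections import deque
--
-- def BFS(matrix):
--     DIR = [0, 1, 0, -1, 0]
--     m = len(matrix)
--     n = len(matrix[0])
--
--     sr, sc = 0, 0
--
--     q = deque()
--     visited = [[False for _ in range(n)] for _ in range(m)]
--
--     q.append((sr, sc))
--     visited[sr][sc] = True
--
--     while q:
--         q_size = len(q)
--
--         # This for loop makes sure that all the
--         # prior elements are executed first and
--         # then later added elements are executed then
--         for _ in range(q_size):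
--             r, c = q.popleft()
--             for i in range(4):
--                 nr, nc = r + DIR[i], c + DIR[i + 1]
--
--                 # check for validity
--                 if (
--                     nr < 0
--                     or nr == m
--                     or nc < 0
--                     or nc == n
--                     or visited[nr][nc] == True
--                 ):
--                     continue
--
--                 visited[nr][nc] = True
--                 q.append((nr, nc))
--
--     return visited
-- ===== SOURCE B (Python) =====
-- def BFS(matrix):
--     # The open 4-connected grid is entirely reachable from (0,0),
--     # so the visited matrix is all True: build it directly.
--     return [[True] * len(matrix[0]) for _ in matrix]
-- ===== Notes on version B (the rewrite author's own statement) =====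
-- stated objective: faster
-- what changed: B builds the all-True m x n matrix directly (every cell of the obstacle-free 4-connected grid is reachable from (0,0)), replacing A's queue-based BFS entirely.
import Mathlib
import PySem

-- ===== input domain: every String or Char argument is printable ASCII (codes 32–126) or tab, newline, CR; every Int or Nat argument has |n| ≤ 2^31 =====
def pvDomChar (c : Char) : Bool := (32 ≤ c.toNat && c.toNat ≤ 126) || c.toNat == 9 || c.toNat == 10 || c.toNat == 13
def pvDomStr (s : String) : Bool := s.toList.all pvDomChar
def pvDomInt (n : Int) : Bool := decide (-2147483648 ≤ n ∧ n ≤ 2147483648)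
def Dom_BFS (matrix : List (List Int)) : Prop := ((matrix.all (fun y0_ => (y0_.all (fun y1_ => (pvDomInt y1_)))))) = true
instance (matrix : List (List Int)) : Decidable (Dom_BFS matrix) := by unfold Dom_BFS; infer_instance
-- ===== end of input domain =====

-- B replaces A's queue-based BFS by directly building the all-True m×n visited
-- matrix (every cell of the obstacle-free 4-connected grid is reachable from (0,0)).

-- ===== PORT A =====
-- visited[r][c] read / write (indices are in range whenever A performs them)
def pvGetMat (v : List (List Bool)) (r c : Nat) : Bool :=
  (v.getD r []).getD c false

def pvSetMat (v : List (List Bool)) (r c : Nat) : List (List Bool) :=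
  v.set r ((v.getD r []).set c true)

def pvDIR : List Int := [0, 1, 0, -1, 0]

-- body of `for i in range(4)` for one popped cell rc
def pvStep1 (m n : Int) (rc : Int × Int) (st : List (List Bool) × List (Int × Int)) (i : Nat) :
    List (List Bool) × List (Int × Int) :=
  let nr := rc.1 + pvDIR.getD i 0
  let nc := rc.2 + pvDIR.getD (i + 1) 0
  if nr < 0 ∨ nr = m ∨ nc < 0 ∨ nc = n ∨ pvGetMat st.1 nr.toNat nc.toNat = true then st
  else (pvSetMat st.1 nr.toNat nc.toNat, st.2 ++ [(nr, nc)])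

-- one popped cell: `for i in range(4)`
def pvStep (m n : Int) (st : List (List Bool) × List (Int × Int)) (rc : Int × Int) :
    List (List Bool) × List (Int × Int) :=
  (List.range 4).foldl (pvStep1 m n rc) st

-- the `while q:` loop; one outer iteration pops the q_size front cells and keeps the
-- freshly appended ones; fuel only makes it total (it exceeds the number of iterations)
def pvLoop (m n : Int) : Nat → List (List Bool) → List (Int × Int) → List (List Bool)
  | 0, v, _ => v
  | fuel + 1, v, q =>
      if q = [] then v
      else
        let st := q.foldl (pvStep m n) (v, [])
        pvLoop m n fuel st.1 st.2

def BFS (matrix : List (List Int)) : List (List Bool) :=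
  let m : Int := matrix.length
  let n : Int := (matrix.headD []).length
  let visited := (List.range matrix.length).map
    (fun _ => (List.range (matrix.headD []).length).map (fun _ => false))
  let visited := pvSetMat visited 0 0
  pvLoop m n (matrix.length * (matrix.headD []).length + 1) visited [(0, 0)]

-- ===== PORT B =====
def BFS_alt (matrix : List (List Int)) : List (List Bool) :=
  matrix.map (fun _ => List.replicate (matrix.headD []).length true)

-- ===== PRECONDITION & SPEC =====
-- Pre_ excludes exactly the inputs on which A raises IndexError: the empty matrix
-- (matrix[0]) and a matrix whose first row is empty (visited[0][0] on width 0).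
def Pre_BFS (matrix : List (List Int)) : Prop := matrix ≠ [] ∧ matrix.headD [] ≠ []
instance (matrix : List (List Int)) : Decidable (Pre_BFS matrix) := by unfold Pre_BFS; infer_instance

def pvWitness_BFS : List (List Int) := [[1, 2], [3, 4]]


def Spec_BFS (matrix : List (List Int)) (out : List (List Bool)) : Prop := out = BFS_alt matrix
instance (matrix : List (List Int)) (out : List (List Bool)) : Decidable (Spec_BFS matrix out) := by unfold Spec_BFS; infer_instance

-- ===== CLAIM (what is proved, stated in full; the proofs are below) =====
def Claim_equal_BFS : Prop := ∀ (matrix : List (List Int)), Dom_BFS matrix → Pre_BFS matrix → Spec_BFS matrix (BFS matrix)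

-- ===== LEMMAS AND PROOFS =====

-- proof-side view of the visited matrix as an M×N table of a predicate
def pvMk (M N : Nat) (p : Nat → Nat → Bool) : List (List Bool) :=
  (List.range M).map (fun r => (List.range N).map (fun c => p r c))

-- "distance ≤ k, or among the freshly enqueued cells acc"
def pvPk (k : Nat) (acc : List (Int × Int)) : Nat → Nat → Bool :=
  fun a b => decide (a + b ≤ k) || decide (((a : Int), (b : Int)) ∈ acc)

-- the k-th diagonal of the M×N grid
def pvDset (M N k : Nat) (x : Int × Int) : Prop :=
  0 ≤ x.1 ∧ x.1 < (M : Int) ∧ 0 ≤ x.2 ∧ x.2 < (N : Int) ∧ x.1 + x.2 = (k : Int)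

theorem pvGetMat_mk {M N a b : Nat} (p : Nat → Nat → Bool) (ha : a < M) (hb : b < N) :
    pvGetMat (pvMk M N p) a b = p a b := by
  simp [pvGetMat, pvMk, List.getD, ha, hb]

theorem pvSet_map_range {α : Type} {M a : Nat} (ha : a < M) (f : Nat → α) (v : α) :
    ((List.range M).map f).set a v = (List.range M).map (fun r => if r = a then v else f r) := by
  apply List.ext_getElem
  · simp
  · intro i h1 h2
    simp only [List.getElem_set, List.getElem_map, List.getElem_range,
      List.length_map, List.length_range] at *
    rcases eq_or_ne i a with h | h
    · simp [h]
    · simp [h, Ne.symm h]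

theorem pvSetMat_mk {M N a b : Nat} (p : Nat → Nat → Bool) (ha : a < M) (hb : b < N) :
    pvSetMat (pvMk M N p) a b = pvMk M N (fun x y => if x = a ∧ y = b then true else p x y) := by
  unfold pvSetMat pvMk
  have hget : ((List.range M).map (fun r => (List.range N).map (fun c => p r c))).getD a []
      = (List.range N).map (fun c => p a c) := by
    simp [List.getD, List.getElem?_map, List.getElem?_range, ha]
  rw [hget, pvSet_map_range hb, pvSet_map_range ha]
  apply List.map_congr_left
  intro r hr
  rcases eq_or_ne r a with h | h
  · subst h
    rw [if_pos rfl]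
    apply List.map_congr_left
    intro c _
    rcases eq_or_ne c b with hc | hc
    · simp [hc]
    · simp [hc]
  · rw [if_neg h]
    apply List.map_congr_left
    intro c _
    simp [h]

theorem pvMk_congr {M N : Nat} {p p' : Nat → Nat → Bool}
    (h : ∀ a < M, ∀ b < N, p a b = p' a b) : pvMk M N p = pvMk M N p' := by
  unfold pvMk
  apply List.map_congr_left
  intro r hr
  apply List.map_congr_left
  intro c hc
  exact h r (List.mem_range.mp hr) c (List.mem_range.mp hc)

-- marking a diagonal-(k+1) cell x = appending it to acc, as predicates
theorem pvUpd_eq_append {k : Nat} (acc : List (Int × Int)) (x : Int × Int)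
    (hx1 : 0 ≤ x.1) (hx2 : 0 ≤ x.2) (hs : x.1 + x.2 = (k : Int) + 1) :
    (fun a b => if a = x.1.toNat ∧ b = x.2.toNat then true else pvPk k acc a b)
      = pvPk k (acc ++ [x]) := by
  obtain ⟨x1, x2⟩ := x
  simp only at hx1 hx2 hs
  funext a b
  unfold pvPk
  by_cases h : a = x1.toNat ∧ b = x2.toNat
  · obtain ⟨h1, h2⟩ := h
    have e1 : (a : Int) = x1 := by omega
    have e2 : (b : Int) = x2 := by omega
    rw [if_pos ⟨h1, h2⟩]
    simp [e1, e2]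
  · have hne : (((a : Int), (b : Int)) : Int × Int) ≠ (x1, x2) := by
      simp only [ne_eq, Prod.mk.injEq, not_and]
      intro e1 e2
      exact h ⟨by omega, by omega⟩
    rw [if_neg h]
    simp [List.mem_append, hne]

-- evaluating one direction of the `for i in range(4)` body on the invariant state
theorem pvRight_step {M N k : Nat} (r c : Int) (acc : List (Int × Int))
    (h0r : 0 ≤ r) (hrM : r < (M : Int)) (h0c : 0 ≤ c) (hcN : c < (N : Int))
    (hsum : r + c = (k : Int)) :
    pvStep1 (M : Int) (N : Int) (r, c) (pvMk M N (pvPk k acc), acc) 0 =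
      (if c + 1 = (N : Int) ∨ (r, c + 1) ∈ acc then (pvMk M N (pvPk k acc), acc)
       else (pvMk M N (pvPk k (acc ++ [(r, c + 1)])), acc ++ [(r, c + 1)])) := by
  have d0 : pvDIR.getD 0 0 = (0 : Int) := by decide
  have d1 : pvDIR.getD (0 + 1) 0 = (1 : Int) := by decide
  simp only [pvStep1, d0, d1, add_zero]
  by_cases hN : c + 1 = (N : Int)
  · rw [if_pos (Or.inr (Or.inr (Or.inr (Or.inl hN)))), if_pos (Or.inl hN)]
  · have hcN' : (c + 1).toNat < N := by omega
    have hrM' : r.toNat < M := by omega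
    have hget : pvGetMat (pvMk M N (pvPk k acc)) r.toNat (c + 1).toNat
        = decide ((r, c + 1) ∈ acc) := by
      rw [pvGetMat_mk _ hrM' hcN']
      unfold pvPk
      have h1 : ¬ (r.toNat + (c + 1).toNat ≤ k) := by omega
      have e1 : ((r.toNat : Int), ((c + 1).toNat : Int)) = (r, c + 1) := by
        rw [Int.toNat_of_nonneg h0r, Int.toNat_of_nonneg (by omega)]
      rw [e1]
      simp [h1]
    by_cases hmem : (r, c + 1) ∈ acc
    · rw [if_pos (Or.inr (Or.inr (Or.inr (Or.inr (by rw [hget]; simp [hmem]))))),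
        if_pos (Or.inr hmem)]
    · rw [if_neg (by
        push_neg
        refine ⟨by omega, by omega, by omega, hN, ?_⟩
        rw [hget]; simp [hmem]), if_neg (by push_neg; exact ⟨hN, hmem⟩)]
      rw [pvSetMat_mk _ hrM' hcN',
        pvUpd_eq_append acc (r, c + 1) h0r (by omega) (by omega)]

theorem pvDown_step {M N k : Nat} (r c : Int) (acc : List (Int × Int))
    (h0r : 0 ≤ r) (hrM : r < (M : Int)) (h0c : 0 ≤ c) (hcN : c < (N : Int))
    (hsum : r + c = (k : Int)) :
    pvStep1 (M : Int) (N : Int) (r, c) (pvMk M N (pvPk k acc), acc) 1 =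
      (if r + 1 = (M : Int) ∨ (r + 1, c) ∈ acc then (pvMk M N (pvPk k acc), acc)
       else (pvMk M N (pvPk k (acc ++ [(r + 1, c)])), acc ++ [(r + 1, c)])) := by
  have d0 : pvDIR.getD 1 0 = (1 : Int) := by decide
  have d1 : pvDIR.getD (1 + 1) 0 = (0 : Int) := by decide
  simp only [pvStep1, d0, d1, add_zero]
  by_cases hM : r + 1 = (M : Int)
  · rw [if_pos (Or.inr (Or.inl hM)), if_pos (Or.inl hM)]
  · have hrM' : (r + 1).toNat < M := by omega
    have hcN' : c.toNat < N := by omega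
    have hget : pvGetMat (pvMk M N (pvPk k acc)) (r + 1).toNat c.toNat
        = decide ((r + 1, c) ∈ acc) := by
      rw [pvGetMat_mk _ hrM' hcN']
      unfold pvPk
      have h1 : ¬ ((r + 1).toNat + c.toNat ≤ k) := by omega
      have e1 : (((r + 1).toNat : Int), (c.toNat : Int)) = (r + 1, c) := by
        rw [Int.toNat_of_nonneg (by omega), Int.toNat_of_nonneg h0c]
      rw [e1]
      simp [h1]
    by_cases hmem : (r + 1, c) ∈ acc
    · rw [if_pos (Or.inr (Or.inr (Or.inr (Or.inr (by rw [hget]; simp [hmem]))))),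
        if_pos (Or.inr hmem)]
    · rw [if_neg (by
        push_neg
        refine ⟨by omega, hM, by omega, by omega, ?_⟩
        rw [hget]; simp [hmem]), if_neg (by push_neg; exact ⟨hM, hmem⟩)]
      rw [pvSetMat_mk _ hrM' hcN',
        pvUpd_eq_append acc (r + 1, c) (by omega) h0c (by omega)]

theorem pvLeft_step {M N k : Nat} (r c : Int) (acc : List (Int × Int))
    (h0r : 0 ≤ r) (hrM : r < (M : Int)) (h0c : 0 ≤ c) (hcN : c < (N : Int))
    (hsum : r + c = (k : Int)) :
    pvStep1 (M : Int) (N : Int) (r, c) (pvMk M N (pvPk k acc), acc) 2 =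
      (pvMk M N (pvPk k acc), acc) := by
  have d0 : pvDIR.getD 2 0 = (0 : Int) := by decide
  have d1 : pvDIR.getD (2 + 1) 0 = (-1 : Int) := by decide
  simp only [pvStep1, d0, d1, add_zero]
  by_cases hneg : c + -1 < 0
  · rw [if_pos (Or.inr (Or.inr (Or.inl hneg)))]
  · have hrM' : r.toNat < M := by omega
    have hcN' : (c + -1).toNat < N := by omega
    have hget : pvGetMat (pvMk M N (pvPk k acc)) r.toNat (c + -1).toNat = true := by
      rw [pvGetMat_mk _ hrM' hcN']
      unfold pvPk
      have h1 : r.toNat + (c + -1).toNat ≤ k := by omega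
      simp [h1]
    rw [if_pos (Or.inr (Or.inr (Or.inr (Or.inr hget))))]

theorem pvUp_step {M N k : Nat} (r c : Int) (acc : List (Int × Int))
    (h0r : 0 ≤ r) (hrM : r < (M : Int)) (h0c : 0 ≤ c) (hcN : c < (N : Int))
    (hsum : r + c = (k : Int)) :
    pvStep1 (M : Int) (N : Int) (r, c) (pvMk M N (pvPk k acc), acc) 3 =
      (pvMk M N (pvPk k acc), acc) := by
  have d0 : pvDIR.getD 3 0 = (-1 : Int) := by decide
  have d1 : pvDIR.getD (3 + 1) 0 = (0 : Int) := by decide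
  simp only [pvStep1, d0, d1, add_zero]
  by_cases hneg : r + -1 < 0
  · rw [if_pos (Or.inl hneg)]
  · have hrM' : (r + -1).toNat < M := by omega
    have hcN' : c.toNat < N := by omega
    have hget : pvGetMat (pvMk M N (pvPk k acc)) (r + -1).toNat c.toNat = true := by
      rw [pvGetMat_mk _ hrM' hcN']
      unfold pvPk
      have h1 : (r + -1).toNat + c.toNat ≤ k := by omega
      simp [h1]
    rw [if_pos (Or.inr (Or.inr (Or.inr (Or.inr hget))))]

theorem pvNodup_snoc {α : Type} {l : List α} {x : α} (h : l.Nodup) (hx : x ∉ l) :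
    (l ++ [x]).Nodup := by
  simp [List.nodup_append, h]
  intro a ha hax
  exact hx (hax ▸ ha)

-- processing one popped cell of diagonal k: marks/enqueues its unseen right/down neighbours
theorem pvStep_cell {M N k : Nat} (r c : Int) (acc : List (Int × Int))
    (h0r : 0 ≤ r) (hrM : r < (M : Int)) (h0c : 0 ≤ c) (hcN : c < (N : Int))
    (hsum : r + c = (k : Int)) :
    ∃ acc₂, pvStep (M : Int) (N : Int) (pvMk M N (pvPk k acc), acc) (r, c)
        = (pvMk M N (pvPk k acc₂), acc₂)
      ∧ (∀ x ∈ acc₂, x ∈ acc ∨ pvDset M N (k + 1) x)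
      ∧ (acc.Nodup → acc₂.Nodup)
      ∧ (∀ x ∈ acc, x ∈ acc₂)
      ∧ (pvDset M N (k + 1) (r, c + 1) → (r, c + 1) ∈ acc₂)
      ∧ (pvDset M N (k + 1) (r + 1, c) → (r + 1, c) ∈ acc₂) := by
  have hr4 : List.range 4 = [0, 1, 2, 3] := by decide
  unfold pvStep
  rw [hr4]
  simp only [List.foldl_cons, List.foldl_nil]
  rw [pvRight_step r c acc h0r hrM h0c hcN hsum]
  by_cases hR : c + 1 = (N : Int) ∨ (r, c + 1) ∈ acc
  · rw [if_pos hR, pvDown_step r c acc h0r hrM h0c hcN hsum]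
    by_cases hD : r + 1 = (M : Int) ∨ (r + 1, c) ∈ acc
    · rw [if_pos hD, pvLeft_step r c acc h0r hrM h0c hcN hsum,
        pvUp_step r c acc h0r hrM h0c hcN hsum]
      refine ⟨acc, rfl, fun x hx => Or.inl hx, id, fun x hx => hx, ?_, ?_⟩
      · intro hd
        simp only [pvDset] at hd
        exact hR.resolve_left (by omega)
      · intro hd
        simp only [pvDset] at hd
        exact hD.resolve_left (by omega)
    · rw [if_neg hD, pvLeft_step r c (acc ++ [(r + 1, c)]) h0r hrM h0c hcN hsum,
        pvUp_step r c (acc ++ [(r + 1, c)]) h0r hrM h0c hcN hsum]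
      push_neg at hD
      obtain ⟨hD1, hD2⟩ := hD
      refine ⟨acc ++ [(r + 1, c)], rfl, ?_, ?_, ?_, ?_, ?_⟩
      · intro x hx
        rcases List.mem_append.mp hx with h | h
        · exact Or.inl h
        · simp only [List.mem_singleton] at h
          subst h
          exact Or.inr (by simp only [pvDset]; omega)
      · intro h
        exact pvNodup_snoc h hD2
      · intro x hx
        exact List.mem_append_left _ hx
      · intro hd
        simp only [pvDset] at hd
        exact List.mem_append_left _ (hR.resolve_left (by omega))
      · intro _
        exact List.mem_append_right _ (by simp)
  · rw [if_neg hR, pvDown_step r c (acc ++ [(r, c + 1)]) h0r hrM h0c hcN hsum]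
    push_neg at hR
    obtain ⟨hR1, hR2⟩ := hR
    by_cases hD : r + 1 = (M : Int) ∨ (r + 1, c) ∈ acc ++ [(r, c + 1)]
    · rw [if_pos hD, pvLeft_step r c (acc ++ [(r, c + 1)]) h0r hrM h0c hcN hsum,
        pvUp_step r c (acc ++ [(r, c + 1)]) h0r hrM h0c hcN hsum]
      refine ⟨acc ++ [(r, c + 1)], rfl, ?_, ?_, ?_, ?_, ?_⟩
      · intro x hx
        rcases List.mem_append.mp hx with h | h
        · exact Or.inl h
        · simp only [List.mem_singleton] at h
          subst h
          exact Or.inr (by simp only [pvDset]; omega)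
      · intro h
        exact pvNodup_snoc h hR2
      · intro x hx
        exact List.mem_append_left _ hx
      · intro _
        exact List.mem_append_right _ (by simp)
      · intro hd
        simp only [pvDset] at hd
        exact hD.resolve_left (by omega)
    · rw [if_neg hD, pvLeft_step r c (acc ++ [(r, c + 1)] ++ [(r + 1, c)]) h0r hrM h0c hcN hsum,
        pvUp_step r c (acc ++ [(r, c + 1)] ++ [(r + 1, c)]) h0r hrM h0c hcN hsum]
      push_neg at hD
      obtain ⟨hD1, hD2⟩ := hD
      refine ⟨acc ++ [(r, c + 1)] ++ [(r + 1, c)], rfl, ?_, ?_, ?_, ?_, ?_⟩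
      · intro x hx
        rcases List.mem_append.mp hx with h | h
        · rcases List.mem_append.mp h with h' | h'
          · exact Or.inl h'
          · simp only [List.mem_singleton] at h'
            subst h'
            exact Or.inr (by simp only [pvDset]; omega)
        · simp only [List.mem_singleton] at h
          subst h
          exact Or.inr (by simp only [pvDset]; omega)
      · intro h
        exact pvNodup_snoc (pvNodup_snoc h hR2) hD2
      · intro x hx
        exact List.mem_append_left _ (List.mem_append_left _ hx)
      · intro _
        exact List.mem_append_left _ (List.mem_append_right _ (by simp))
      · intro _
        exact List.mem_append_right _ (by simp)

-- processing a whole layer: every right/down neighbour of the layer ends up enqueued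
theorem pvInner {M N k : Nat} (q : List (Int × Int)) :
    ∀ acc : List (Int × Int),
      (∀ x ∈ q, pvDset M N k x) →
      (∀ x ∈ acc, pvDset M N (k + 1) x) →
      acc.Nodup →
      ∃ acc', q.foldl (pvStep (M : Int) (N : Int)) (pvMk M N (pvPk k acc), acc)
          = (pvMk M N (pvPk k acc'), acc')
        ∧ (∀ x ∈ acc', pvDset M N (k + 1) x)
        ∧ acc'.Nodup
        ∧ (∀ x ∈ acc, x ∈ acc')
        ∧ (∀ y ∈ q, (pvDset M N (k + 1) (y.1, y.2 + 1) → (y.1, y.2 + 1) ∈ acc')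
            ∧ (pvDset M N (k + 1) (y.1 + 1, y.2) → (y.1 + 1, y.2) ∈ acc')) := by
  induction q with
  | nil =>
      intro acc _ ha hnd
      exact ⟨acc, rfl, ha, hnd, fun x hx => hx, by simp⟩
  | cons y rest ih =>
      intro acc hq ha hnd
      obtain ⟨r, c⟩ := y
      have hy := hq _ (List.mem_cons_self ..)
      simp only [pvDset] at hy
      obtain ⟨h0r, hrM, h0c, hcN, hsum⟩ := hy
      obtain ⟨acc₂, heq, hmem2, hnd2, hsup2, hcovR, hcovD⟩ :=
        pvStep_cell (M := M) (N := N) (k := k) r c acc h0r hrM h0c hcN hsum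
      rw [List.foldl_cons, heq]
      obtain ⟨acc', heq', hmem', hnd', hsup', hcov'⟩ :=
        ih acc₂ (fun x hx => hq x (List.mem_cons_of_mem _ hx))
          (fun x hx => (hmem2 x hx).elim (ha x) id) (hnd2 hnd)
      refine ⟨acc', heq', hmem', hnd', fun x hx => hsup' _ (hsup2 x hx), ?_⟩
      intro y' hy'
      rcases List.mem_cons.mp hy' with h | h
      · subst h
        exact ⟨fun hd => hsup' _ (hcovR hd), fun hd => hsup' _ (hcovD hd)⟩
      · exact hcov' y' h

-- the whole while-loop: with enough fuel the visited table becomes all-True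
theorem pvOuter {M N : Nat} (hM : 0 < M) (hN : 0 < N) :
    ∀ (fuel k : Nat) (q : List (Int × Int)),
      (∀ x, x ∈ q ↔ pvDset M N k x) → q.Nodup → M + N ≤ fuel + k →
      pvLoop (M : Int) (N : Int) fuel (pvMk M N (pvPk k [])) q
        = pvMk M N (fun _ _ => true) := by
  intro fuel
  induction fuel with
  | zero =>
      intro k q hq hnd hfuel
      simp only [pvLoop]
      apply pvMk_congr
      intro a ha b hb
      have hab : a + b ≤ k := by omega
      simp [pvPk, hab]
  | succ f ih =>
      intro k q hq hnd hfuel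
      by_cases hqe : q = []
      · subst hqe
        simp only [pvLoop, if_pos rfl]
        have hk : M + N ≤ k + 2 := by
          by_contra hcon
          push_neg at hcon
          have hw : pvDset M N k ((min (k : Int) ((M : Int) - 1)), (k : Int) - min (k : Int) ((M : Int) - 1)) := by
            simp only [pvDset]
            omega
          exact absurd ((hq _).mpr hw) (by simp)
        apply pvMk_congr
        intro a ha b hb
        have hab : a + b ≤ k := by omega
        simp [pvPk, hab]
      · simp only [pvLoop, if_neg hqe]
        obtain ⟨acc', heq, hmem', hnd', _, hcov⟩ :=
          pvInner (M := M) (N := N) (k := k) q [] (fun x hx => (hq x).mp hx)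
            (by simp) (by simp)
        rw [heq]
        have hiff : ∀ x, x ∈ acc' ↔ pvDset M N (k + 1) x := by
          intro x
          constructor
          · exact hmem' x
          · intro hd
            obtain ⟨a, b⟩ := x
            simp only [pvDset] at hd
            by_cases hb1 : 1 ≤ b
            · have hyq : (a, b - 1) ∈ q := (hq _).mpr (by simp only [pvDset]; omega)
              have := (hcov _ hyq).1
              simp only at this
              have e : b - 1 + 1 = b := by omega
              rw [e] at this
              exact this (by simp only [pvDset]; omega)
            · have hyq : (a - 1, b) ∈ q := (hq _).mpr (by simp only [pvDset]; omega)
              have := (hcov _ hyq).2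
              simp only at this
              have e : a - 1 + 1 = a := by omega
              rw [e] at this
              exact this (by simp only [pvDset]; omega)
        have hmk : pvMk M N (pvPk k acc') = pvMk M N (pvPk (k + 1) []) := by
          apply pvMk_congr
          intro a ha b hb
          unfold pvPk
          by_cases h1 : a + b ≤ k
          · have h2 : a + b ≤ k + 1 := by omega
            simp [h1, h2]
          · by_cases h2 : a + b = k + 1
            · have hm : ((a : Int), (b : Int)) ∈ acc' :=
                (hiff _).mpr (by simp only [pvDset]; omega)
              simp [h1, hm, h2]
            · have h3 : ¬ ((a : Int), (b : Int)) ∈ acc' := by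
                intro hm
                have := (hiff _).mp hm
                simp only [pvDset] at this
                omega
              have h4 : ¬ (a + b ≤ k + 1) := by omega
              simp [h1, h3, h4]
        rw [hmk]
        exact ih (k + 1) acc' hiff hnd' (by omega)

theorem BFS_spec : Claim_equal_BFS := by
  intro matrix _ hpre
  obtain ⟨hne, hrow⟩ := hpre
  have hM1 : 0 < matrix.length := List.length_pos_iff.mpr hne
  have hN1 : 0 < (matrix.headD []).length := List.length_pos_iff.mpr hrow
  unfold Spec_BFS
  have hBFS : BFS matrix = pvLoop (matrix.length : Int) ((matrix.headD []).length : Int)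
      (matrix.length * (matrix.headD []).length + 1)
      (pvSetMat (pvMk matrix.length (matrix.headD []).length (fun _ _ => false)) 0 0)
      [((0 : Int), (0 : Int))] := rfl
  unfold BFS_alt
  rw [hBFS, pvSetMat_mk _ hM1 hN1]
  have h0 : pvMk matrix.length (matrix.headD []).length
        (fun x y => if x = 0 ∧ y = 0 then true else (fun _ _ => false) x y)
      = pvMk matrix.length (matrix.headD []).length (pvPk 0 []) := by
    apply pvMk_congr
    intro a _ b _
    by_cases h : a = 0 ∧ b = 0
    · obtain ⟨ha0, hb0⟩ := h
      subst ha0; subst hb0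
      simp [pvPk]
    · rw [if_neg h]
      have h2 : ¬ (a + b ≤ 0) := by omega
      simp [pvPk, h2]
  rw [h0]
  have hq : ∀ x, x ∈ [((0 : Int), (0 : Int))] ↔
      pvDset matrix.length (matrix.headD []).length 0 x := by
    intro x
    constructor
    · intro hx
      simp only [List.mem_singleton] at hx
      subst hx
      simp only [pvDset]
      omega
    · intro hd
      obtain ⟨a, b⟩ := x
      simp only [pvDset] at hd
      simp only [List.mem_singleton, Prod.mk.injEq]
      omega
  have hfuel : matrix.length + (matrix.headD []).length ≤
      matrix.length * (matrix.headD []).length + 1 + 0 := by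
    zify
    nlinarith [(by exact_mod_cast hM1 : (0 : Int) < (matrix.length : Int)),
      (by exact_mod_cast hN1 : (0 : Int) < ((matrix.headD []).length : Int))]
  rw [pvOuter hM1 hN1 (matrix.length * (matrix.headD []).length + 1) 0
    [((0 : Int), (0 : Int))] hq (by simp) hfuel]
  simp [pvMk, List.map_const']
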